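-- pv_equiv track=rewrite | github.com/abin102/unet | scripts/embed_viz_umap_tsne.py | build_label_name_map
-- ===== SOURCE A (Python) =====
-- HEAD_CLASSES = ["Very_Low", "Non-burnable"]
--
-- MEDIUM_CLASSES = ["Low", "Moderate"]
--
-- TAIL_CLASSES = ["High", "Very_High", "Water"]
--
-- def build_label_name_map(unique_labels):
--     # map labels into HEAD/MEDIUM/TAIL explicit strings if possible
--     mapping = {}
--     for lbl in unique_labels:
--         s = str(lbl)
--         if s in HEAD_CLASSES:
--             mapping[s] = f"{s} (head)"
--         elif s in MEDIUM_CLASSES: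
--             mapping[s] = f"{s} (medium)"
--         elif s in TAIL_CLASSES:
--             mapping[s] = f"{s} (tail)"
--         else:
--             mapping[s] = s
--     return mapping
-- ===== SOURCE B (Python) =====
-- HEAD_CLASSES = ["Very_Low", "Non-burnable"]
--
-- MEDIUM_CLASSES = ["Low", "Moderate"]
--
-- TAIL_CLASSES = ["High", "Very_High", "Water"]
--
-- def build_label_name_map(unique_labels):
--     # Pass 1: identity mapping for every label.
--     mapping = {str(lbl): str(lbl) for lbl in unique_labels}
--     # Pass 2: iterate the class tables and annotate the entries that are present.
--     for names, tag in ((HEAD_CLASSES, "head"),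
--                        (MEDIUM_CLASSES, "medium"),
--                        (TAIL_CLASSES, "tail")):
--         for name in names:
--             if name in mapping:
--                 mapping[name] = f"{name} ({tag})"
--     return mapping
-- ===== Notes on version B (the rewrite author's own statement) =====
-- stated objective: alternative
-- what changed: Instead of classifying each label with an if/elif membership ladder, B first builds an identity mapping over all labels and then iterates over the seven class names themselves, patching in place the suffix of those that occur as keys (loop over classes, not over labels).
import Mathlib
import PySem

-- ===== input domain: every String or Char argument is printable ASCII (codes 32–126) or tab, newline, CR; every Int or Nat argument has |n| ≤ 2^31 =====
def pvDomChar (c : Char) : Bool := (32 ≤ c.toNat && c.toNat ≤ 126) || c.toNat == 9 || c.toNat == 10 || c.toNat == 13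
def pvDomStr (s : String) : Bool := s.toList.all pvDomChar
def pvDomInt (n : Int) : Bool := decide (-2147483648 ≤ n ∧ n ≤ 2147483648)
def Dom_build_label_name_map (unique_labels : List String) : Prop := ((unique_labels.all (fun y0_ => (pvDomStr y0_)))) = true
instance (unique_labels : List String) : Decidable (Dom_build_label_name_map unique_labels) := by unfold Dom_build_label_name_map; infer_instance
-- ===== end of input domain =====

-- B replaces A's per-label if/elif membership ladder by two staged passes: an identity
-- mapping over the labels, then a loop over the class tables patching present keys (alternative).

-- ===== PORT A =====
def HEAD_CLASSES : List String := ["Very_Low", "Non-burnable"]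
def MEDIUM_CLASSES : List String := ["Low", "Moderate"]
def TAIL_CLASSES : List String := ["High", "Very_High", "Water"]

def build_label_name_map (unique_labels : List String) : List (String × String) :=
  (unique_labels.foldl (fun (mapping : PySem.Dict String String) lbl =>
      let s := lbl   -- str(lbl) is lbl for strings
      if s ∈ HEAD_CLASSES then mapping.insert s (s ++ " (head)")
      else if s ∈ MEDIUM_CLASSES then mapping.insert s (s ++ " (medium)")
      else if s ∈ TAIL_CLASSES then mapping.insert s (s ++ " (tail)")
      else mapping.insert s s)
    PySem.Dict.empty).items

-- ===== PORT B =====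
def build_label_name_map_alt (unique_labels : List String) : List (String × String) :=
  -- Pass 1: identity mapping for every label (str(lbl) is lbl for strings).
  let mapping := unique_labels.foldl
    (fun (m : PySem.Dict String String) lbl => m.insert lbl lbl) PySem.Dict.empty
  -- Pass 2: iterate the class tables and annotate the entries that are present.
  let mapping := [(HEAD_CLASSES, "head"), (MEDIUM_CLASSES, "medium"), (TAIL_CLASSES, "tail")].foldl
    (fun (m : PySem.Dict String String) p =>
      p.1.foldl (fun (m : PySem.Dict String String) name =>
          if m.contains name then m.insert name (name ++ " (" ++ p.2 ++ ")") else m) m)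
    mapping
  mapping.items

-- ===== PRECONDITION & SPEC =====
def Spec_build_label_name_map (unique_labels : List String) (out : List (String × String)) : Prop := out = build_label_name_map_alt unique_labels
instance (unique_labels : List String) (out : List (String × String)) : Decidable (Spec_build_label_name_map unique_labels out) := by unfold Spec_build_label_name_map; infer_instance

-- ===== CLAIM (what is proved, stated in full; the proofs are below) =====
def Claim_equal_build_label_name_map : Prop := ∀ (unique_labels : List String), Dom_build_label_name_map unique_labels → Spec_build_label_name_map unique_labels (build_label_name_map unique_labels)

-- ===== LEMMAS AND PROOFS =====

-- the value A stores for a key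
def pvVal (s : String) : String :=
  if s ∈ HEAD_CLASSES then s ++ " (head)"
  else if s ∈ MEDIUM_CLASSES then s ++ " (medium)"
  else if s ∈ TAIL_CLASSES then s ++ " (tail)"
  else s

-- one conditional patch step of B's second pass
def pvStep (n v : String) (d : PySem.Dict String String) : PySem.Dict String String :=
  if d.contains n then d.insert n v else d

-- B's second pass written as the seven explicit steps
def pvPatch (d : PySem.Dict String String) : PySem.Dict String String :=
  pvStep "Water" ("Water" ++ " (" ++ "tail" ++ ")")
    (pvStep "Very_High" ("Very_High" ++ " (" ++ "tail" ++ ")")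
      (pvStep "High" ("High" ++ " (" ++ "tail" ++ ")")
        (pvStep "Moderate" ("Moderate" ++ " (" ++ "medium" ++ ")")
          (pvStep "Low" ("Low" ++ " (" ++ "medium" ++ ")")
            (pvStep "Non-burnable" ("Non-burnable" ++ " (" ++ "head" ++ ")")
              (pvStep "Very_Low" ("Very_Low" ++ " (" ++ "head" ++ ")") d))))))

lemma pvA_eq (unique_labels : List String) :
    build_label_name_map unique_labels =
      (unique_labels.foldl (fun (m : PySem.Dict String String) s => m.insert s (pvVal s))
        PySem.Dict.empty).items := by
  unfold build_label_name_map
  congr 1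
  congr 1
  funext m s
  simp only [pvVal]
  split_ifs <;> rfl

lemma pvB_eq (unique_labels : List String) :
    build_label_name_map_alt unique_labels =
      (pvPatch (unique_labels.foldl
        (fun (m : PySem.Dict String String) lbl => m.insert lbl lbl) PySem.Dict.empty)).items := rfl

lemma pvStep_contains (n v : String) (d : PySem.Dict String String) (k : String) :
    (pvStep n v d).contains k = d.contains k := by
  unfold pvStep
  split_ifs with h
  · rw [PySem.Dict.contains_insert]
    by_cases hk : k = n
    · subst hk; simp [h]
    · simp [hk]
  · rfl

lemma pvStep_getD (n v : String) (d : PySem.Dict String String) (k d0 : String) :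
    (pvStep n v d).getD k d0 =
      if k = n ∧ d.contains n = true then v else d.getD k d0 := by
  unfold pvStep
  split_ifs with h h2 h2 <;> simp_all [PySem.Dict.getD_insert]

lemma pvStep_keys (n v : String) (d : PySem.Dict String String) :
    (pvStep n v d).keys = d.keys := by
  unfold pvStep
  split_ifs with h
  · exact PySem.Dict.keys_insert_of_contains d v h
  · rfl

lemma pvPatch_keys (d : PySem.Dict String String) : (pvPatch d).keys = d.keys := by
  simp [pvPatch, pvStep_keys]

lemma pvGetD_foldl_insert_fun (f : String → String) (l : List String)
    (d : PySem.Dict String String) (k d0 : String) :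
    (l.foldl (fun d s => d.insert s (f s)) d).getD k d0 =
      if k ∈ l then f k else d.getD k d0 := by
  induction l generalizing d with
  | nil => simp
  | cons x xs ih =>
    rw [List.foldl_cons, ih]
    by_cases hx : k = x <;> by_cases hxs : k ∈ xs <;>
      simp_all [PySem.Dict.getD_insert]

lemma pvPatch_getD (d : PySem.Dict String String) (k : String)
    (hc : d.contains k = true) (hv : d.getD k "" = k) :
    (pvPatch d).getD k "" = pvVal k := by
  by_cases h1 : k = "Very_Low" <;> by_cases h2 : k = "Non-burnable" <;>
    by_cases h3 : k = "Low" <;> by_cases h4 : k = "Moderate" <;>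
    by_cases h5 : k = "High" <;> by_cases h6 : k = "Very_High" <;>
    by_cases h7 : k = "Water" <;>
    simp_all [pvPatch, pvVal, pvStep_getD, pvStep_contains,
      HEAD_CLASSES, MEDIUM_CLASSES, TAIL_CLASSES]

-- ===== VERDICT (by name: the statement is the Claim_ definition above) =====
theorem build_label_name_map_spec : Claim_equal_build_label_name_map := by
  intro unique_labels _
  unfold Spec_build_label_name_map
  rw [pvA_eq, pvB_eq]
  set dA := unique_labels.foldl (fun (m : PySem.Dict String String) s => m.insert s (pvVal s))
    PySem.Dict.empty with hdA
  set d1 := unique_labels.foldl (fun (m : PySem.Dict String String) lbl => m.insert lbl lbl)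
    PySem.Dict.empty with hd1
  have hkA : dA.keys = PySem.Set.update PySem.Dict.empty.keys unique_labels :=
    PySem.Dict.keys_foldl_insert unique_labels _ _
  have hk1 : d1.keys = PySem.Set.update PySem.Dict.empty.keys unique_labels :=
    PySem.Dict.keys_foldl_insert unique_labels _ _
  have hndA : dA.keys.Nodup :=
    PySem.Dict.nodup_keys_foldl_insert unique_labels _ _ (by simp)
  have hnd1 : d1.keys.Nodup :=
    PySem.Dict.nodup_keys_foldl_insert unique_labels _ _ (by simp)
  have hndB : (pvPatch d1).keys.Nodup := by rw [pvPatch_keys]; exact hnd1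
  rw [PySem.Dict.items_eq_map_keys dA hndA "", PySem.Dict.items_eq_map_keys (pvPatch d1) hndB "",
    pvPatch_keys, hkA, hk1]
  apply List.map_congr_left
  intro k hkmem
  have hklbl : k ∈ unique_labels := by
    simpa [PySem.Set.mem_update] using hkmem
  have hA : dA.getD k "" = pvVal k := by
    rw [hdA, pvGetD_foldl_insert_fun]; simp [hklbl]
  have h1 : d1.getD k "" = k := by
    have := pvGetD_foldl_insert_fun (fun s => s) unique_labels PySem.Dict.empty k ""
    rw [hd1]; rw [this]; simp [hklbl]
  have hc1 : d1.contains k = true := by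
    rw [PySem.Dict.contains_iff_mem_keys, hk1]
    simpa [PySem.Set.mem_update] using hklbl
  rw [hA, pvPatch_getD d1 k hc1 h1]
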